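-- pv_equiv track=rewrite | github.com/shaurya2577/protein-modeler | backend/data_collection/trial_collector.py | merge_trials
-- ===== SOURCE A (Python) =====
-- from typing import List, Dict, Optional
--
-- def merge_trials(trial_lists: List[List[Dict]]) -> List[Dict]:
--     """Merge multiple trial lists, deduplicating by NCT ID"""
--
--     trial_map = {}
--
--     for trial_list in trial_lists:
--         for trial in trial_list:
--             nct_id = trial.get("nct_id")
--             if not nct_id:
--                 continue
--
--             if nct_id not in trial_map:
--                 trial_map[nct_id] = trial
--             else:
--                 # Keep existing, but update missing fields
--                 existing = trial_map[nct_id]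
--                 for key, value in trial.items():
--                     if value and not existing.get(key):
--                         existing[key] = value
--
--     return list(trial_map.values())
-- ===== SOURCE B (Python) =====
-- def merge_trials(trial_lists):
--     """Merge multiple trial lists, deduplicating by NCT ID"""
--     # Phase 1: group trials by truthy nct_id, preserving first-appearance order.
--     groups = {}
--     for trial_list in trial_lists:
--         for trial in trial_list:
--             nct_id = trial.get("nct_id")
--             if nct_id:
--                 groups.setdefault(nct_id, []).append(trial)
--     # Phase 2: reduce each group onto its first trial (mutated in place).
--     merged = []
--     for group in groups.values():
--         base = group[0]
--         for other in group[1:]: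
--             for key, value in other.items():
--                 if value and not base.get(key):
--                     base[key] = value
--         merged.append(base)
--     return merged
-- ===== Notes on version B (the rewrite author's own statement) =====
-- stated objective: alternative
-- what changed: A merges each trial into a growing id-keyed map in one incremental pass; B first groups the trials by truthy nct_id into an ordered dict of buckets, then reduces each bucket onto its first trial in a second pass.
import Mathlib
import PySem

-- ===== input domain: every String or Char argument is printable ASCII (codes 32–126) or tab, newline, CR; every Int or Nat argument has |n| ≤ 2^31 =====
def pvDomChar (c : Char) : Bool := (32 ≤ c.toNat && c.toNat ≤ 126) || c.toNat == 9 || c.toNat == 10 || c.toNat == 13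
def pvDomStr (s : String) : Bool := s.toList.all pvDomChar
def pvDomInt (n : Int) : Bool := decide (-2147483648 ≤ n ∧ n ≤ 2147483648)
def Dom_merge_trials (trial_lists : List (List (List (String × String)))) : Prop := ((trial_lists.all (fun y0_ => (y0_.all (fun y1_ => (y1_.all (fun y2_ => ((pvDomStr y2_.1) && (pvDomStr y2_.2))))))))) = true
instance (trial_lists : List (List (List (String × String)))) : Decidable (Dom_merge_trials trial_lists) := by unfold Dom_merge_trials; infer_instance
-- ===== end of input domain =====

-- B splits A's single incremental dict-merge pass into a grouping phase (trials bucketed by nct_id)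
-- followed by a per-group reduction phase; both Pythons mutate the first-seen trial dicts in place,
-- and the equivalence proved here is about the return value.

-- ===== PORT A =====
-- shared inner loop of both Pythons: 'for key, value in trial.items(): if value and not existing.get(key): existing[key] = value'
def pvMergeFields (base t : PySem.Dict String String) : PySem.Dict String String :=
  t.items.foldl (fun b kv => if kv.2 ≠ "" ∧ b.getD kv.1 "" = "" then b.insert kv.1 kv.2 else b) base

def merge_trials (trial_lists : List (List (List (String × String)))) : List (List (String × String)) :=
  let trial_map :=
    trial_lists.foldl (fun tm trial_list =>
      trial_list.foldl (fun tm trial =>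
        let t := PySem.Dict.ofList trial
        let nct_id := t.getD "nct_id" ""
        if nct_id = "" then tm
        else if tm.contains nct_id = false then tm.insert nct_id t
        else tm.insert nct_id (pvMergeFields (tm.getD nct_id PySem.Dict.empty) t)) tm)
      PySem.Dict.empty
  trial_map.values.map PySem.Dict.items

-- ===== PORT B =====
def merge_trials_alt (trial_lists : List (List (List (String × String)))) : List (List (String × String)) :=
  let groups :=
    trial_lists.foldl (fun g trial_list =>
      trial_list.foldl (fun g trial =>
        let t := PySem.Dict.ofList trial
        let nct_id := t.getD "nct_id" ""
        if nct_id = "" then g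
        else g.modify nct_id [] (fun grp => grp ++ [t])) g)
      PySem.Dict.empty
  groups.values.map (fun group =>
    match group with
    | [] => []  -- unreachable: every group is built nonempty
    | base :: rest => (rest.foldl pvMergeFields base).items)

-- ===== PRECONDITION & SPEC =====
def Spec_merge_trials (trial_lists : List (List (List (String × String)))) (out : List (List (String × String))) : Prop := out = merge_trials_alt trial_lists
instance (trial_lists : List (List (List (String × String)))) (out : List (List (String × String))) : Decidable (Spec_merge_trials trial_lists out) := by unfold Spec_merge_trials; infer_instance

-- ===== CLAIM (what is proved, stated in full; the proofs are below) =====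
def Claim_equal_merge_trials : Prop := ∀ (trial_lists : List (List (List (String × String)))), Dom_merge_trials trial_lists → Spec_merge_trials trial_lists (merge_trials trial_lists)

-- ===== LEMMAS AND PROOFS =====

-- A's loop body on the accumulator dict
def pvStepA (tm : PySem.Dict String (PySem.Dict String String)) (trial : List (String × String)) :
    PySem.Dict String (PySem.Dict String String) :=
  let t := PySem.Dict.ofList trial
  let nct_id := t.getD "nct_id" ""
  if nct_id = "" then tm
  else if tm.contains nct_id = false then tm.insert nct_id t
  else tm.insert nct_id (pvMergeFields (tm.getD nct_id PySem.Dict.empty) t)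

-- B's grouping loop body
def pvStepB (g : PySem.Dict String (List (PySem.Dict String String))) (trial : List (String × String)) :
    PySem.Dict String (List (PySem.Dict String String)) :=
  let t := PySem.Dict.ofList trial
  let nct_id := t.getD "nct_id" ""
  if nct_id = "" then g
  else g.modify nct_id [] (fun grp => grp ++ [t])

-- B's reduction of one group
def pvRed : List (PySem.Dict String String) → PySem.Dict String String
  | [] => PySem.Dict.empty
  | b :: r => r.foldl pvMergeFields b

-- invariant tying A's merged map to B's grouping map
def pvInv (g : PySem.Dict String (List (PySem.Dict String String)))
    (m : PySem.Dict String (PySem.Dict String String)) : Prop :=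
  m.items = g.items.map (fun p => (p.1, pvRed p.2)) ∧ g.keys.Nodup ∧ ∀ p ∈ g.items, p.2 ≠ []

lemma pvInv_step' (g : PySem.Dict String (List (PySem.Dict String String)))
    (m : PySem.Dict String (PySem.Dict String String)) (h : pvInv g m)
    (t : PySem.Dict String String) (k : String) :
    pvInv (g.modify k [] (fun grp => grp ++ [t]))
      (if m.contains k = false then m.insert k t
       else m.insert k (pvMergeFields (m.getD k PySem.Dict.empty) t)) := by
  obtain ⟨hitems, hnd, hne⟩ := h
  have hkeys : m.keys = g.keys := by
    simp [PySem.Dict.keys, hitems, List.map_map, Function.comp]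
  have hndm : m.keys.Nodup := hkeys ▸ hnd
  have hcont : m.contains k = g.contains k := by
    rw [PySem.Dict.contains_eq_decide_mem_keys, PySem.Dict.contains_eq_decide_mem_keys, hkeys]
  by_cases hc : g.contains k = true
  · -- key already present: overwrite in place on both sides
    have hm : m.contains k = true := by rw [hcont]; exact hc
    have hO : g.get? k ≠ none := by
      intro h0
      rw [PySem.Dict.get?_eq_none_iff_contains] at h0
      simp [hc] at h0
    obtain ⟨grp, hget⟩ := Option.ne_none_iff_exists'.mp hO
    have hmemg : (k, grp) ∈ g.items := PySem.Dict.mem_items_of_get?_eq_some _ hget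
    have hgD : g.getD k [] = grp := PySem.Dict.getD_of_mem_items _ hmemg hnd []
    have hmemm : (k, pvRed grp) ∈ m.items := by
      rw [hitems]
      exact List.mem_map_of_mem hmemg
    have hmD : m.getD k PySem.Dict.empty = pvRed grp :=
      PySem.Dict.getD_of_mem_items _ hmemm hndm PySem.Dict.empty
    have hgrpne : grp ≠ [] := hne _ hmemg
    have hred : pvRed (grp ++ [t]) = pvMergeFields (pvRed grp) t := by
      cases grp with
      | nil => exact absurd rfl hgrpne
      | cons b r => simp [pvRed, List.foldl_append]
    rw [if_neg (by simp [hm])]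
    simp only [PySem.Dict.modify, hgD]
    refine ⟨?_, ?_, ?_⟩
    · have hAit : ∀ (v : PySem.Dict String String),
          (m.insert k v).items = m.items.map (fun p => if p.1 == k then (k, v) else p) := by
        intro v; simp [PySem.Dict.items_insert, hm]
      have hGit : ∀ (v : List (PySem.Dict String String)),
          (g.insert k v).items = g.items.map (fun p => if p.1 == k then (k, v) else p) := by
        intro v; simp [PySem.Dict.items_insert, hc]
      rw [hAit, hGit, hitems, List.map_map, List.map_map]
      refine List.map_congr_left ?_
      intro p hp
      by_cases hpk : p.1 = k
      · simp [Function.comp, hpk, hmD, hred]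
      · simp [Function.comp, hpk]
    · exact PySem.Dict.nodup_keys_insert _ _ _ hnd
    · intro p hp
      rw [PySem.Dict.mem_items_insert] at hp
      rcases hp with rfl | ⟨hp, _⟩
      · simp
      · exact hne _ hp
  · -- fresh key: both sides append
    have hc' : g.contains k = false := by
      cases hgc : g.contains k
      · rfl
      · exact absurd hgc hc
    have hm' : m.contains k = false := by rw [hcont]; exact hc'
    have hgD : g.getD k [] = [] := PySem.Dict.getD_of_not_contains g [] hc'
    rw [if_pos hm']
    simp only [PySem.Dict.modify, hgD, List.nil_append]
    refine ⟨?_, ?_, ?_⟩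
    · have hAit : (m.insert k t).items = m.items ++ [(k, t)] := by
        simp [PySem.Dict.items_insert, hm']
      have hGit : (g.insert k [t]).items = g.items ++ [(k, [t])] := by
        simp [PySem.Dict.items_insert, hc']
      rw [hAit, hGit, hitems, List.map_append]
      simp [pvRed]
    · exact PySem.Dict.nodup_keys_insert _ _ _ hnd
    · intro p hp
      rw [PySem.Dict.mem_items_insert] at hp
      rcases hp with rfl | ⟨hp, _⟩
      · simp
      · exact hne _ hp

lemma pvInv_step (g : PySem.Dict String (List (PySem.Dict String String)))
    (m : PySem.Dict String (PySem.Dict String String)) (trial : List (String × String))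
    (h : pvInv g m) : pvInv (pvStepB g trial) (pvStepA m trial) := by
  unfold pvStepA pvStepB
  by_cases hk : (PySem.Dict.ofList trial).getD "nct_id" "" = ""
  · rw [if_pos hk, if_pos hk]
    exact h
  · rw [if_neg hk, if_neg hk]
    exact pvInv_step' g m h _ _

lemma pvInv_foldl_inner (trs : List (List (String × String)))
    (g : PySem.Dict String (List (PySem.Dict String String)))
    (m : PySem.Dict String (PySem.Dict String String)) (h : pvInv g m) :
    pvInv (trs.foldl pvStepB g) (trs.foldl pvStepA m) := by
  induction trs generalizing g m with
  | nil => exact h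
  | cons tr trs ih => exact ih _ _ (pvInv_step g m tr h)

lemma pvInv_foldl_outer (tls : List (List (List (String × String))))
    (g : PySem.Dict String (List (PySem.Dict String String)))
    (m : PySem.Dict String (PySem.Dict String String)) (h : pvInv g m) :
    pvInv (tls.foldl (fun g tl => tl.foldl pvStepB g) g)
          (tls.foldl (fun m tl => tl.foldl pvStepA m) m) := by
  induction tls generalizing g m with
  | nil => exact h
  | cons tl tls ih => exact ih _ _ (pvInv_foldl_inner tl g m h)

lemma pv_main (tls : List (List (List (String × String)))) :
    merge_trials tls = merge_trials_alt tls := by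
  have hA : merge_trials tls =
      ((tls.foldl (fun m tl => tl.foldl pvStepA m) PySem.Dict.empty).values.map PySem.Dict.items) := rfl
  have hB : merge_trials_alt tls =
      ((tls.foldl (fun g tl => tl.foldl pvStepB g) PySem.Dict.empty).values.map (fun group =>
        match group with
        | [] => []
        | base :: rest => (rest.foldl pvMergeFields base).items)) := rfl
  obtain ⟨hitems, _, hne⟩ :=
    pvInv_foldl_outer tls PySem.Dict.empty PySem.Dict.empty ⟨rfl, List.nodup_nil, by intro p hp; cases hp⟩
  rw [hA, hB]
  simp only [PySem.Dict.values, hitems, List.map_map]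
  refine List.map_congr_left ?_
  intro p hp
  have := hne _ hp
  cases hgrp : p.2 with
  | nil => exact absurd hgrp this
  | cons b r => simp [Function.comp, hgrp, pvRed]

-- ===== VERDICT (by name: the statement is the Claim_ definition above) =====
theorem merge_trials_spec : Claim_equal_merge_trials := by
  intro tls _
  unfold Spec_merge_trials
  exact pv_main tls
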